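-- pv_equiv track=rewrite | github.com/YOYOXUE/DataMining | HW2/SON.py | singletons
-- ===== SOURCE A (Python) =====
-- def singletons(baskets):
--     count={}
--     for i in baskets:
--         for j in i:
--             count[j] = count.get(j,0) + 1
--     k=list(count.keys())
--     k.sort()
--     return k
-- ===== SOURCE B (Python) =====
-- def singletons(baskets):
--     items = []
--     for i in baskets:
--         for j in i:
--             items.append(j)
--     items.sort()
--     result = []
--     for x in items:
--         if not result or x != result[-1]:
--             result.append(x)
--     return result
-- ===== Notes on version B (the rewrite author's own statement) =====
-- stated objective: alternative
-- what changed: Replaces A's hash-table-of-counts-then-sort-the-keys with flatten everything, sort the whole multiset, then one adjacent-dedup pass.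
import Mathlib
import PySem

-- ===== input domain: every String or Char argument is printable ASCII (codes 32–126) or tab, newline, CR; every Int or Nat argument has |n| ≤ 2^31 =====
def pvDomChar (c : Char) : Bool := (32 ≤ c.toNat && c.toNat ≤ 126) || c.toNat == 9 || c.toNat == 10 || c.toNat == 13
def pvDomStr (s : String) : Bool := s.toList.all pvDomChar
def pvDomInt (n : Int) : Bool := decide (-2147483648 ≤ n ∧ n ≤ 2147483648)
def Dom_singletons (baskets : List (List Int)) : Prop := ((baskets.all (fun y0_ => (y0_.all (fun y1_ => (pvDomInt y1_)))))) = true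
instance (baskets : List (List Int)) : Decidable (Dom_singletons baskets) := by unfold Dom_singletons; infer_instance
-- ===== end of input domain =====

-- B replaces A's count-dict-then-sort-keys with flatten + full sort + one adjacent-dedup pass (alternative algorithm, similar cost).

-- ===== PORT A =====
def singletons (baskets : List (List Int)) : List Int :=
  let count := baskets.foldl
    (fun c i => i.foldl (fun c j => c.insert j (c.getD j 0 + 1)) c)
    (PySem.Dict.empty)
  PySem.List.sorted (PySem.Dict.keys count) (fun x => x) false

-- ===== PORT B =====
def singletons_alt (baskets : List (List Int)) : List Int :=
  let items := baskets.foldl (fun acc i => i.foldl (fun acc j => acc ++ [j]) acc) []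
  let s := PySem.List.sorted items (fun x => x) false
  s.foldl
    (fun r x => if r.isEmpty = true ∨ PySem.List.pyGet? r (-1) ≠ some x then r ++ [x] else r)
    []

-- ===== PRECONDITION & SPEC =====
def Spec_singletons (baskets : List (List Int)) (out : List Int) : Prop := out = singletons_alt baskets
instance (baskets : List (List Int)) (out : List Int) : Decidable (Spec_singletons baskets out) := by unfold Spec_singletons; infer_instance

-- ===== CLAIM (what is proved, stated in full; the proofs are below) =====
def Claim_equal_singletons : Prop := ∀ (baskets : List (List Int)), Dom_singletons baskets → Spec_singletons baskets (singletons baskets)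

-- ===== LEMMAS AND PROOFS =====

-- in a strictly increasing list every member is ≤ the last element
lemma le_getLast_of_mem_pairwise_lt : ∀ (l : List Int) (a m : Int),
    l.Pairwise (· < ·) → a ∈ l → l.getLast? = some m → a ≤ m := by
  intro l
  induction l with
  | nil => intro a m _ h; cases h
  | cons x t ih =>
    intro a m hp ha hl
    rcases List.pairwise_cons.mp hp with ⟨hx, ht⟩
    cases t with
    | nil =>
      simp at hl ha; omega
    | cons y t' =>
      rw [List.getLast?_cons_cons] at hl
      rcases List.mem_cons.mp ha with rfl | ha'
      · have hy : y ∈ y :: t' := List.mem_cons_self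
        have : y ≤ m := ih y m ht hy hl
        have : a < y := hx y hy
        omega
      · exact ih a m ht ha' hl

-- the adjacent-dedup fold of B: on a ≤-sorted input it yields a <-sorted list with the same members
lemma dedup_fold_spec : ∀ (s acc : List Int),
    s.Pairwise (· ≤ ·) → acc.Pairwise (· < ·) → (∀ a ∈ acc, ∀ b ∈ s, a ≤ b) →
    (s.foldl (fun r x => if r.isEmpty = true ∨ PySem.List.pyGet? r (-1) ≠ some x then r ++ [x] else r) acc).Pairwise (· < ·) ∧
    (∀ y, y ∈ s.foldl (fun r x => if r.isEmpty = true ∨ PySem.List.pyGet? r (-1) ≠ some x then r ++ [x] else r) acc ↔ y ∈ acc ∨ y ∈ s) := by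
  intro s
  induction s with
  | nil => intro acc _ hacc _; simp [hacc]
  | cons x s' ih =>
    intro acc hs hacc hlink
    rcases List.pairwise_cons.mp hs with ⟨hxle, hs'⟩
    rw [List.foldl_cons]
    have hcond : (acc.isEmpty = true ∨ PySem.List.pyGet? acc (-1) ≠ some x) ↔ acc.getLast? ≠ some x := by
      rw [PySem.List.pyGet?_neg_one]
      constructor
      · rintro (h | h)
        · rw [List.isEmpty_iff.mp h]; simp
        · exact h
      · intro h; exact Or.inr h
    by_cases h : acc.getLast? = some x
    · -- keep acc: x is already the last emitted element
      have hxmem : x ∈ acc := List.mem_of_getLast? h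
      rw [if_neg (by rw [hcond]; simp [h])]
      have hlink' : ∀ a ∈ acc, ∀ b ∈ s', a ≤ b := fun a ha b hb =>
        le_trans (hlink a ha x List.mem_cons_self) (hxle b hb)
      obtain ⟨h1, h2⟩ := ih acc hs' hacc hlink'
      refine ⟨h1, fun y => ?_⟩
      rw [h2 y]
      constructor
      · rintro (hy | hy)
        · exact Or.inl hy
        · exact Or.inr (List.mem_cons_of_mem x hy)
      · rintro (hy | hy)
        · exact Or.inl hy
        · rcases List.mem_cons.mp hy with rfl | hy'
          · exact Or.inl hxmem
          · exact Or.inr hy'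
    · -- append x
      rw [if_pos (hcond.mpr h)]
      have hlt : ∀ a ∈ acc, a < x := by
        intro a ha
        have hle : a ≤ x := hlink a ha x List.mem_cons_self
        rcases Int.lt_or_le a x with hl | hge
        · exact hl
        · exfalso
          have hax : a = x := by omega
          subst hax
          cases hm : acc.getLast? with
          | none => rw [List.getLast?_eq_none_iff.mp hm] at ha; cases ha
          | some m =>
            have h1 : a ≤ m := le_getLast_of_mem_pairwise_lt acc a m hacc ha hm
            have h2 : m ≤ a := hlink m (List.mem_of_getLast? hm) a List.mem_cons_self
            have : m = a := by omega
            subst this; exact h hm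
      have hacc' : (acc ++ [x]).Pairwise (· < ·) := by
        rw [List.pairwise_append]
        exact ⟨hacc, List.pairwise_singleton _ _, fun a ha b hb => by
          rw [List.mem_singleton.mp hb]; exact hlt a ha⟩
      have hlink' : ∀ a ∈ acc ++ [x], ∀ b ∈ s', a ≤ b := by
        intro a ha b hb
        rcases List.mem_append.mp ha with ha' | ha'
        · exact le_trans (hlink a ha' x List.mem_cons_self) (hxle b hb)
        · rw [List.mem_singleton.mp ha']; exact hxle b hb
      obtain ⟨h1, h2⟩ := ih (acc ++ [x]) hs' hacc' hlink'
      refine ⟨h1, fun y => ?_⟩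
      rw [h2 y]
      simp [List.mem_append, List.mem_cons]
      tauto

-- ===== VERDICT (by name: the statement is the Claim_ definition above) =====
theorem singletons_spec : Claim_equal_singletons := by
  intro baskets _
  show singletons baskets = singletons_alt baskets
  unfold singletons singletons_alt
  -- B: the collecting loop builds exactly the flattened list
  have h1 : baskets.flatten.foldl (fun acc j => acc ++ [j]) [] = baskets.flatten := by
    simpa using PySem.List.foldl_append_singleton_eq_self baskets.flatten []
  have hB : (baskets.foldl (fun acc i => i.foldl (fun acc j => acc ++ [j]) acc) ([] : List Int)) = baskets.flatten :=
    List.foldl_flatten.symm.trans h1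
  simp only [hB]
  rw [← List.foldl_flatten, PySem.Dict.keys_foldl_insert, PySem.Dict.keys_empty, PySem.Set.update_nil_left]
  set s := PySem.List.sorted baskets.flatten (fun x => x) false with hsdef
  set R := s.foldl (fun r x => if r.isEmpty = true ∨ PySem.List.pyGet? r (-1) ≠ some x then r ++ [x] else r) [] with hRdef
  have hsorted : s.Pairwise (· ≤ ·) := by
    simpa using PySem.List.sorted_pairwise baskets.flatten (fun x => x)
  obtain ⟨hRlt, hRmem⟩ := dedup_fold_spec s [] hsorted (List.Pairwise.nil) (by simp)
  have hRmem' : ∀ y, y ∈ R ↔ y ∈ baskets.flatten := by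
    intro y
    rw [hRmem y]
    simp [hsdef, PySem.List.mem_sorted]
  have hRnodup : R.Nodup := hRlt.imp (fun h => Int.ne_of_lt h)
  have hperm : R.Perm (PySem.Set.ofList baskets.flatten) := by
    refine (List.perm_ext_iff_of_nodup hRnodup (PySem.Set.nodup_ofList baskets.flatten)).mpr ?_
    intro y
    rw [hRmem' y, PySem.Set.mem_ofList]
  exact PySem.List.sorted_eq_of_perm_of_pairwise_lt (PySem.Set.ofList baskets.flatten) R (fun x => x) hperm hRlt
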